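-- pv_equiv track=rewrite | github.com/joesposito8/prefill-awareness-audit | scripts/audit_validation_logs.py | metric_families
-- ===== SOURCE A (Python) =====
-- def metric_families(metrics: dict) -> dict[str, list[str]]:
--     fams: dict[str, list[str]] = {}
--     for k in metrics:
--         head = k.split("_", 1)[0] if "_" in k else k
--         # finer bucketing for well-known prefixes
--         if k.startswith("recognition_") or k.startswith("detection_") \
--                 or k.startswith("false_attribution_") or k.startswith("miss_") \
--                 or k.startswith("g_mean") or k.startswith("uncertain_") \
--                 or k in ("n_classified", "n_parse_fail"):
--             head = "ground_truth"
--         elif k.startswith("confidence_"):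
--             head = "confidence"
--         elif k.startswith("spontaneous_"):
--             head = "spontaneous"
--         elif k.startswith("latent_") or k.startswith("reflection_") \
--                 or k.startswith("persona_"):
--             head = "latent"
--         elif k.startswith("mc_"):
--             head = "mc"
--         elif k.startswith("diagnostic_"):
--             head = "diagnostic"
--         elif k.startswith("coupling_"):
--             head = "coupling"
--         else:
--             head = "other"
--         fams.setdefault(head, []).append(k)
--     return fams
-- ===== SOURCE B (Python) =====
-- HEAD2FAM = {
--     "recognition": "ground_truth", "detection": "ground_truth",
--     "miss": "ground_truth", "uncertain": "ground_truth",
--     "confidence": "confidence", "spontaneous": "spontaneous",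
--     "latent": "latent", "reflection": "latent", "persona": "latent",
--     "mc": "mc", "diagnostic": "diagnostic", "coupling": "coupling",
-- }
--
--
-- def _family(k: str) -> str:
--     # heads that do not end at the first underscore, plus the two exact keys
--     if k.startswith("false_attribution_") or k.startswith("g_mean") \
--             or k in ("n_classified", "n_parse_fail"):
--         return "ground_truth"
--     i = k.find("_")
--     return HEAD2FAM.get(k[:i], "other") if i >= 0 else "other"
--
--
-- def metric_families(metrics: dict) -> dict[str, list[str]]:
--     tagged = [(_family(k), k) for k in metrics]
--     order = list(dict.fromkeys(f for f, _ in tagged))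
--     return {f: [k for g, k in tagged if g == f] for f in order}
-- ===== Notes on version B (the rewrite author's own statement) =====
-- stated objective: alternative
-- what changed: Classification is redone as a dict lookup on the segment before the first underscore (with the three irregular cases handled up front) instead of A's 14-test if/elif prefix cascade, and grouping is staged (tag each key with its family, dedup the family list for order, then build each bucket by filtering) instead of A's single-pass setdefault accumulation.
import Mathlib
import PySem

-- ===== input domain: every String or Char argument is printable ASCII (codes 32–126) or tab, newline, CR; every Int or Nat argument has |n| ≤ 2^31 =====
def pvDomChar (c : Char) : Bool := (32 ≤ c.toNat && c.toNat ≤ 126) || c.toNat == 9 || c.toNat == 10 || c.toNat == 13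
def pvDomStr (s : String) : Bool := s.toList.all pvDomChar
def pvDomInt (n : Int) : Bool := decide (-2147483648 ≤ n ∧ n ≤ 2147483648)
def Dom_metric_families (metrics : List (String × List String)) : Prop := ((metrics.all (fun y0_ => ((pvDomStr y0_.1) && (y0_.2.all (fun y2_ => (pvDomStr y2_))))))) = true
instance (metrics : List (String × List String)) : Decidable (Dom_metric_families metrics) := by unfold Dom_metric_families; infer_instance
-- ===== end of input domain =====

-- B classifies each key by a dict lookup on the segment before its first underscore (three irregular
-- cases up front) and groups by dedup-then-filter staged passes, instead of A's if/elif prefix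
-- cascade feeding a single-pass setdefault accumulator.

-- ===== PORT A =====
def metric_families (metrics : List (String × List String)) : List (String × List String) :=
  (metrics.foldl (fun fams p =>
      let k := p.1
      -- head = k.split("_", 1)[0] if "_" in k else k   (dead: always overwritten below)
      let _head := if PySem.Str.isIn "_" k then (((PySem.Str.splitMax? k "_" 1).getD []).getD 0 "") else k
      let head :=
        if PySem.Str.startswith k "recognition_" || PySem.Str.startswith k "detection_"
            || PySem.Str.startswith k "false_attribution_" || PySem.Str.startswith k "miss_"
            || PySem.Str.startswith k "g_mean" || PySem.Str.startswith k "uncertain_"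
            || (k == "n_classified" || k == "n_parse_fail") then "ground_truth"
        else if PySem.Str.startswith k "confidence_" then "confidence"
        else if PySem.Str.startswith k "spontaneous_" then "spontaneous"
        else if PySem.Str.startswith k "latent_" || PySem.Str.startswith k "reflection_"
            || PySem.Str.startswith k "persona_" then "latent"
        else if PySem.Str.startswith k "mc_" then "mc"
        else if PySem.Str.startswith k "diagnostic_" then "diagnostic"
        else if PySem.Str.startswith k "coupling_" then "coupling"
        else "other"
      -- fams.setdefault(head, []).append(k)
      fams.modify head [] (· ++ [k]))
    PySem.Dict.empty).items

-- ===== PORT B =====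
def pvHead2Fam : PySem.Dict String String := PySem.Dict.ofList
  [ ("recognition", "ground_truth"), ("detection", "ground_truth"),
    ("miss", "ground_truth"), ("uncertain", "ground_truth"),
    ("confidence", "confidence"), ("spontaneous", "spontaneous"),
    ("latent", "latent"), ("reflection", "latent"), ("persona", "latent"),
    ("mc", "mc"), ("diagnostic", "diagnostic"), ("coupling", "coupling") ]

def pvFamily (k : String) : String :=
  -- heads that do not end at the first underscore, plus the two exact keys
  if PySem.Str.startswith k "false_attribution_" || PySem.Str.startswith k "g_mean"
      || (k == "n_classified" || k == "n_parse_fail") then "ground_truth"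
  else
    let i := PySem.Str.find k "_"
    if 0 ≤ i then pvHead2Fam.getD (PySem.Str.slice k none (some i)) "other" else "other"

def metric_families_alt (metrics : List (String × List String)) : List (String × List String) :=
  let tagged := metrics.map (fun p => (pvFamily p.1, p.1))
  let order := PySem.List.dedup (tagged.map (·.1))
  order.map (fun f => (f, (tagged.filter (fun t => t.1 == f)).map (·.2)))

-- ===== PRECONDITION & SPEC =====
def Spec_metric_families (metrics : List (String × List String)) (out : List (String × List String)) : Prop := out = metric_families_alt metrics
instance (metrics : List (String × List String)) (out : List (String × List String)) : Decidable (Spec_metric_families metrics out) := by unfold Spec_metric_families; infer_instance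

-- ===== CLAIM (what is proved, stated in full; the proofs are below) =====
def Claim_equal_metric_families : Prop := ∀ (metrics : List (String × List String)), Dom_metric_families metrics → Spec_metric_families metrics (metric_families metrics)

-- ===== LEMMAS AND PROOFS =====

-- A prefix test "h_" <+: cs is the same as: cs has an underscore and the segment before its first
-- underscore is exactly h (for h itself underscore-free).
theorem prefix_head_iff (h cs : List Char) (hh : '_' ∉ h) :
    (h ++ ['_'] <+: cs) ↔
      (0 ≤ PySem.Chars.find cs ['_'] ∧ cs.take (PySem.Chars.find cs ['_']).toNat = h) := by
  constructor
  · intro hp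
    obtain ⟨t, ht⟩ := hp
    have hinf : ['_'] <:+: cs := ⟨h, t, by simpa using ht⟩
    have hge : 0 ≤ PySem.Chars.find cs ['_'] := (PySem.Chars.find_nonneg_iff cs ['_']).mpr hinf
    obtain ⟨hpre, hmin⟩ := PySem.Chars.find_spec hge
    set i := (PySem.Chars.find cs ['_']).toNat with hi
    have hdh : ['_'] <+: cs.drop h.length := by rw [← ht]; simp
    have hle : i ≤ h.length := by
      by_contra hlt
      exact hmin h.length (by omega) hdh
    have hieq : i = h.length := by
      rcases Nat.lt_or_ge i h.length with hlt | hge2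
      · exfalso
        obtain ⟨t2, ht2⟩ := hpre
        have h1 : cs[i]? = some '_' := by
          have : (cs.drop i)[0]? = some '_' := by rw [← ht2]; simp
          simpa using this
        have h2 : cs[i]? = h[i]? := by
          rw [← ht, List.append_assoc, List.getElem?_append_left hlt]
        rw [h2, List.getElem?_eq_getElem hlt] at h1
        have : h[i] = '_' := Option.some_inj.mp h1
        exact hh (this ▸ List.getElem_mem hlt)
      · omega
    refine ⟨hge, ?_⟩
    rw [hieq, ← ht]
    simp
  · rintro ⟨hge, htake⟩
    obtain ⟨hpre, -⟩ := PySem.Chars.find_spec hge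
    obtain ⟨t, ht⟩ := hpre
    refine ⟨t, ?_⟩
    calc h ++ ['_'] ++ t = cs.take (PySem.Chars.find cs ['_']).toNat ++ (['_'] ++ t) := by
          rw [htake]; simp
      _ = cs := by rw [ht]; simp

-- When k has an underscore, testing the prefix h ++ "_" is comparing k's first segment with h.
theorem startswith_head (k h hu : String) (hh : '_' ∉ h.toList)
    (hcat : hu.toList = h.toList ++ ['_']) (hge : 0 ≤ PySem.Str.find k "_") :
    PySem.Str.startswith k hu = (PySem.Str.slice k none (some (PySem.Str.find k "_")) == h) := by
  have hsl : (PySem.Str.slice k none (some (PySem.Str.find k "_"))).toList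
      = k.toList.take (PySem.Str.find k "_").toNat := by
    simp [PySem.Chars.slice_eq_listSlice, PySem.List.slice_to _ (by simpa using hge)]
  have hfind : PySem.Str.find k "_" = PySem.Chars.find k.toList ['_'] := by simp
  rw [Bool.eq_iff_iff]
  simp only [beq_iff_eq, String.ext_iff, hsl]
  rw [show PySem.Str.startswith k hu = PySem.Chars.startswith k.toList hu.toList from by simp]
  rw [PySem.Chars.startswith_iff, hcat]
  rw [prefix_head_iff _ _ hh]
  constructor
  · rintro ⟨-, ht⟩; rw [← hfind] at ht; exact ht
  · intro ht; exact ⟨by rw [← hfind]; exact hge, by rw [hfind] at ht; exact ht⟩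

-- When k has no underscore, no pattern containing '_' is a prefix of k.
theorem startswith_none (k hu : String) (hu' : '_' ∈ hu.toList)
    (hneg : ¬ 0 ≤ PySem.Str.find k "_") : PySem.Str.startswith k hu = false := by
  rw [show PySem.Str.startswith k hu = PySem.Chars.startswith k.toList hu.toList from by simp]
  rw [Bool.eq_false_iff]
  intro hc
  have hpre : hu.toList <+: k.toList := (PySem.Chars.startswith_iff _ _).mp hc
  have : ['_'] <:+: k.toList :=
    List.IsInfix.trans ((List.singleton_infix_iff '_' hu.toList).mpr hu') hpre.isInfix
  exact hneg (by simpa using (PySem.Chars.find_nonneg_iff k.toList ['_']).mpr this)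

-- pvHead2Fam.getD spelled out as an if-chain over the head segment.
lemma getD_pvHead2Fam (s : String) : pvHead2Fam.getD s "other" =
    if "recognition" = s then "ground_truth" else if "detection" = s then "ground_truth"
    else if "miss" = s then "ground_truth" else if "uncertain" = s then "ground_truth"
    else if "confidence" = s then "confidence" else if "spontaneous" = s then "spontaneous"
    else if "latent" = s then "latent" else if "reflection" = s then "latent"
    else if "persona" = s then "latent" else if "mc" = s then "mc"
    else if "diagnostic" = s then "diagnostic" else if "coupling" = s then "coupling"
    else "other" := by
  have hmk : pvHead2Fam = PySem.Dict.mk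
    [ ("recognition", "ground_truth"), ("detection", "ground_truth"),
      ("miss", "ground_truth"), ("uncertain", "ground_truth"),
      ("confidence", "confidence"), ("spontaneous", "spontaneous"),
      ("latent", "latent"), ("reflection", "latent"), ("persona", "latent"),
      ("mc", "mc"), ("diagnostic", "diagnostic"), ("coupling", "coupling") ] := by rfl
  have hnil : (PySem.Dict.mk ([] : List (String × String))).get? s = none := rfl
  rw [hmk, PySem.Dict.getD_eq_get?_getD]
  simp only [PySem.Dict.get?_mk_cons, beq_iff_eq, hnil,
    apply_ite (Option.getD · "other"), Option.getD_some, Option.getD_none]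

-- A's cascade computes pvFamily.
set_option maxHeartbeats 1000000 in
lemma family_eq (k : String) :
    (if PySem.Str.startswith k "recognition_" || PySem.Str.startswith k "detection_"
        || PySem.Str.startswith k "false_attribution_" || PySem.Str.startswith k "miss_"
        || PySem.Str.startswith k "g_mean" || PySem.Str.startswith k "uncertain_"
        || (k == "n_classified" || k == "n_parse_fail") then "ground_truth"
     else if PySem.Str.startswith k "confidence_" then "confidence"
     else if PySem.Str.startswith k "spontaneous_" then "spontaneous"
     else if PySem.Str.startswith k "latent_" || PySem.Str.startswith k "reflection_"
        || PySem.Str.startswith k "persona_" then "latent"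
     else if PySem.Str.startswith k "mc_" then "mc"
     else if PySem.Str.startswith k "diagnostic_" then "diagnostic"
     else if PySem.Str.startswith k "coupling_" then "coupling"
     else "other") = pvFamily k := by
  unfold pvFamily
  by_cases hge : 0 ≤ PySem.Str.find k "_"
  · rw [startswith_head k "recognition" "recognition_" (by decide) (by decide) hge,
       startswith_head k "detection" "detection_" (by decide) (by decide) hge,
       startswith_head k "miss" "miss_" (by decide) (by decide) hge,
       startswith_head k "uncertain" "uncertain_" (by decide) (by decide) hge,
       startswith_head k "confidence" "confidence_" (by decide) (by decide) hge,
       startswith_head k "spontaneous" "spontaneous_" (by decide) (by decide) hge,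
       startswith_head k "latent" "latent_" (by decide) (by decide) hge,
       startswith_head k "reflection" "reflection_" (by decide) (by decide) hge,
       startswith_head k "persona" "persona_" (by decide) (by decide) hge,
       startswith_head k "mc" "mc_" (by decide) (by decide) hge,
       startswith_head k "diagnostic" "diagnostic_" (by decide) (by decide) hge,
       startswith_head k "coupling" "coupling_" (by decide) (by decide) hge]
    simp only [hge, if_true, getD_pvHead2Fam]
    set s := PySem.Str.slice k none (some (PySem.Str.find k "_")) with hs
    by_cases hfa : PySem.Str.startswith k "false_attribution_" = true
    · simp only [hfa, Bool.true_or, Bool.or_true, if_true]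
    rw [Bool.not_eq_true] at hfa
    by_cases hgm : PySem.Str.startswith k "g_mean" = true
    · simp only [hgm, Bool.true_or, Bool.or_true, if_true]
    rw [Bool.not_eq_true] at hgm
    by_cases he1 : (k == "n_classified") = true
    · simp only [he1, Bool.true_or, Bool.or_true, if_true]
    rw [Bool.not_eq_true] at he1
    by_cases he2 : (k == "n_parse_fail") = true
    · simp only [he2, Bool.or_true, if_true]
    rw [Bool.not_eq_true] at he2
    simp only [hfa, hgm, he1, he2, Bool.or_false,
      Bool.false_eq_true, if_false, Bool.or_eq_true, beq_iff_eq]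
    by_cases h1 : s = "recognition"
    · simp [h1]
    by_cases h2 : s = "detection"
    · simp [h2]
    by_cases h3 : s = "miss"
    · simp [h3]
    by_cases h4 : s = "uncertain"
    · simp [h4]
    by_cases h5 : s = "confidence"
    · simp [h5]
    by_cases h6 : s = "spontaneous"
    · simp [h6]
    by_cases h7 : s = "latent"
    · simp [h7]
    by_cases h8 : s = "reflection"
    · simp [h8]
    by_cases h9 : s = "persona"
    · simp [h9]
    by_cases h10 : s = "mc"
    · simp [h10]
    by_cases h11 : s = "diagnostic"
    · simp [h11]
    by_cases h12 : s = "coupling"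
    · simp [h12]
    simp [h1, h2, h3, h4, h5, h6, h7, h8, h9, h10, h11, h12,
      Ne.symm h1, Ne.symm h2, Ne.symm h3, Ne.symm h4, Ne.symm h5, Ne.symm h6,
      Ne.symm h7, Ne.symm h8, Ne.symm h9, Ne.symm h10, Ne.symm h11, Ne.symm h12]
  · have he1 : (k == "n_classified") = false := by
      rw [beq_eq_false_iff_ne]; rintro rfl; exact hge (by decide)
    have he2 : (k == "n_parse_fail") = false := by
      rw [beq_eq_false_iff_ne]; rintro rfl; exact hge (by decide)
    simp only [startswith_none k "recognition_" (by decide) hge,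
      startswith_none k "detection_" (by decide) hge,
      startswith_none k "false_attribution_" (by decide) hge,
      startswith_none k "miss_" (by decide) hge,
      startswith_none k "g_mean" (by decide) hge,
      startswith_none k "uncertain_" (by decide) hge,
      startswith_none k "confidence_" (by decide) hge,
      startswith_none k "spontaneous_" (by decide) hge,
      startswith_none k "latent_" (by decide) hge,
      startswith_none k "reflection_" (by decide) hge,
      startswith_none k "persona_" (by decide) hge,
      startswith_none k "mc_" (by decide) hge,
      startswith_none k "diagnostic_" (by decide) hge,
      startswith_none k "coupling_" (by decide) hge,
      he1, he2, hge, Bool.or_self, if_false]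
    simp

-- ===== VERDICT (by name: the statement is the Claim_ definition above) =====
theorem metric_families_spec : Claim_equal_metric_families := by
  intro metrics _
  unfold Spec_metric_families metric_families metric_families_alt
  have hfun : (fun (fams : PySem.Dict String (List String)) (p : String × List String) =>
      let k := p.1
      let _head := if PySem.Str.isIn "_" k then (((PySem.Str.splitMax? k "_" 1).getD []).getD 0 "") else k
      let head :=
        if PySem.Str.startswith k "recognition_" || PySem.Str.startswith k "detection_"
            || PySem.Str.startswith k "false_attribution_" || PySem.Str.startswith k "miss_"
            || PySem.Str.startswith k "g_mean" || PySem.Str.startswith k "uncertain_"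
            || (k == "n_classified" || k == "n_parse_fail") then "ground_truth"
        else if PySem.Str.startswith k "confidence_" then "confidence"
        else if PySem.Str.startswith k "spontaneous_" then "spontaneous"
        else if PySem.Str.startswith k "latent_" || PySem.Str.startswith k "reflection_"
            || PySem.Str.startswith k "persona_" then "latent"
        else if PySem.Str.startswith k "mc_" then "mc"
        else if PySem.Str.startswith k "diagnostic_" then "diagnostic"
        else if PySem.Str.startswith k "coupling_" then "coupling"
        else "other"
      fams.modify head [] (· ++ [k]))
      = (fun (fams : PySem.Dict String (List String)) (p : String × List String) =>
          fams.modify (pvFamily p.1) [] (· ++ [p.1])) := by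
    funext fams p
    dsimp only
    rw [family_eq]
  rw [hfun]
  have hfold : metrics.foldl (fun (fams : PySem.Dict String (List String)) p =>
        fams.modify (pvFamily p.1) [] (· ++ [p.1])) PySem.Dict.empty
      = (metrics.map (fun p => (pvFamily p.1, p.1))).foldl
          (fun d t => d.modify t.1 [] (· ++ [t.2])) PySem.Dict.empty := by
    rw [List.foldl_map]
  rw [hfold]
  set tagged := metrics.map (fun p => (pvFamily p.1, p.1)) with htag
  have hnd : ((tagged.foldl (fun d t => d.modify t.1 [] (· ++ [t.2])) PySem.Dict.empty).keys).Nodup :=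
    PySem.Dict.nodup_keys_foldl_modify_key tagged (·.1) [] (fun d t => (· ++ [t.2]))
      PySem.Dict.empty PySem.Dict.nodup_keys_empty
  rw [PySem.Dict.items_eq_map_keys _ hnd []]
  have hkeys : (tagged.foldl (fun d t => d.modify t.1 [] (· ++ [t.2])) PySem.Dict.empty).keys
      = PySem.List.dedup (tagged.map (·.1)) := by
    rw [PySem.Dict.keys_foldl_modify_key]
    simp [PySem.Dict.keys_empty, PySem.Set.update_nil_left]
  rw [hkeys]
  refine List.map_congr_left ?_
  intro f _
  rw [PySem.Dict.getD_foldl_modify_append]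
  simp [PySem.Dict.getD_empty]
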